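-- pv_equiv track=rewrite | github.com/ecliptik/doskutsu | tools/build-master-palette.py | dedupe_close
-- ===== SOURCE A (Python) =====
-- def dedupe_close(colors, channel_threshold=12):
--     """Remove colors whose channel-sum-distance to an earlier kept color is
--     within channel_threshold. Order-preserving."""
--     out = []
--     for c in colors:
--         keep = True
--         for ec in out:
--             if (abs(c[0] - ec[0]) + abs(c[1] - ec[1]) + abs(c[2] - ec[2])
--                     <= channel_threshold):
--                 keep = False
--                 break
--         if keep:
--             out.append(c)
--     return out
-- ===== SOURCE B (Python) =====
-- def dedupe_close(colors, channel_threshold=12):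
--     """Leader-based filtering: repeatedly keep the first pending color and
--     drop every remaining color within channel_threshold of it."""
--     out = []
--     pending = list(colors)
--     while pending:
--         head = pending[0]
--         out.append(head)
--         pending = [c for c in pending[1:]
--                    if abs(c[0] - head[0]) + abs(c[1] - head[1]) + abs(c[2] - head[2])
--                       > channel_threshold]
--     return out
-- ===== Notes on version B (the rewrite author's own statement) =====
-- stated objective: alternative
-- what changed: Replaced A's per-element inner scan over the kept list with leader-based filtering: repeatedly take the first pending color and filter the whole pending list against that single leader, so no accumulator is ever scanned.
import Mathlib
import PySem

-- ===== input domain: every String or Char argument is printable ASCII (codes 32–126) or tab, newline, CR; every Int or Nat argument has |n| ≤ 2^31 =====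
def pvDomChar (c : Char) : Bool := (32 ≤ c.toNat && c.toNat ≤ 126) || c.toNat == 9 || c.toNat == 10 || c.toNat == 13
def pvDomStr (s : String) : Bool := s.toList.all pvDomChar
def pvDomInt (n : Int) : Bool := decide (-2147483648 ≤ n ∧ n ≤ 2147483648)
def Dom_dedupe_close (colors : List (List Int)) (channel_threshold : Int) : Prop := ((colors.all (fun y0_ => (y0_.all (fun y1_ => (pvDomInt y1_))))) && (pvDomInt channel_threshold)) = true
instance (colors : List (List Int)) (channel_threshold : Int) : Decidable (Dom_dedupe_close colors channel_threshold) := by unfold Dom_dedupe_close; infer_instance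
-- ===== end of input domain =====

-- B replaces A's per-element scan of the kept list by leader-based filtering of the
-- still-pending colors; same cost, genuinely different traversal (objective: alternative).

-- ===== PORT A =====
-- abs(c[0]-ec[0]) + abs(c[1]-ec[1]) + abs(c[2]-ec[2]); indexing is in range under Pre_
def pvDist (c ec : List Int) : Int :=
  |PySem.List.pyGetD c 0 0 - PySem.List.pyGetD ec 0 0| +
  |PySem.List.pyGetD c 1 0 - PySem.List.pyGetD ec 1 0| +
  |PySem.List.pyGetD c 2 0 - PySem.List.pyGetD ec 2 0|

-- A's inner 'for ec in out: … break' loop deciding 'keep'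
def pvKeep (c : List Int) (t : Int) : List (List Int) → Bool
  | [] => true
  | ec :: rest => if pvDist c ec ≤ t then false else pvKeep c t rest

def dedupe_close (colors : List (List Int)) (channel_threshold : Int) : List (List Int) :=
  colors.foldl (fun out c => if pvKeep c channel_threshold out then out ++ [c] else out) []

-- ===== PORT B =====
-- the while loop over 'pending': keep the leader, filter the rest against it
def dedupe_close_alt (colors : List (List Int)) (channel_threshold : Int) : List (List Int) :=
  match colors with
  | [] => []
  | head :: rest =>
      head :: dedupe_close_alt (rest.filter (fun c => decide (channel_threshold < pvDist c head))) channel_threshold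
termination_by colors.length
decreasing_by simp only [List.length_unattach, List.length_cons]; exact Nat.lt_succ_of_le (le_trans (List.length_filter_le _ _) (by simp))

-- ===== PRECONDITION & SPEC =====
-- Pre_: the Python A raises IndexError iff there are ≥ 2 colors and some color has
-- fewer than 3 channels (the inner comparison then indexes c[1] or ec[1] out of range).
def Pre_dedupe_close (colors : List (List Int)) (channel_threshold : Int) : Prop :=
  colors.length ≤ 1 ∨ ∀ c ∈ colors, 3 ≤ c.length
instance (colors : List (List Int)) (channel_threshold : Int) : Decidable (Pre_dedupe_close colors channel_threshold) := by unfold Pre_dedupe_close; infer_instance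
def pvWitness_dedupe_close : List (List Int) × Int := ([[0, 0, 0], [5, 5, 5], [100, 0, 0]], 12)

def Spec_dedupe_close (colors : List (List Int)) (channel_threshold : Int) (out : List (List Int)) : Prop := out = dedupe_close_alt colors channel_threshold
instance (colors : List (List Int)) (channel_threshold : Int) (out : List (List Int)) : Decidable (Spec_dedupe_close colors channel_threshold out) := by unfold Spec_dedupe_close; infer_instance

-- ===== CLAIM (what is proved, stated in full; the proofs are below) =====
def Claim_equal_dedupe_close : Prop := ∀ (colors : List (List Int)) (channel_threshold : Int), Dom_dedupe_close colors channel_threshold → Pre_dedupe_close colors channel_threshold → Spec_dedupe_close colors channel_threshold (dedupe_close colors channel_threshold)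

-- ===== LEMMAS AND PROOFS =====

-- pvKeep is the 'no element of out is close' predicate; it splits over append
theorem pvKeep_append (c : List Int) (t : Int) (xs ys : List (List Int)) :
    pvKeep c t (xs ++ ys) = (pvKeep c t xs && pvKeep c t ys) := by
  induction xs with
  | nil => simp [pvKeep]
  | cons ec rest ih => by_cases h : pvDist c ec ≤ t <;> simp [pvKeep, h, ih]

theorem pvKeep_singleton (c : List Int) (t : Int) (ec : List Int) :
    pvKeep c t [ec] = decide (t < pvDist c ec) := by
  by_cases h : pvDist c ec ≤ t <;> simp [pvKeep, h] <;> try omega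

theorem alt_nil (t : Int) : dedupe_close_alt [] t = [] := by
  simp only [dedupe_close_alt]

theorem alt_cons (t : Int) (head : List Int) (rest : List (List Int)) :
    dedupe_close_alt (head :: rest) t
      = head :: dedupe_close_alt (rest.filter (fun c => decide (t < pvDist c head))) t := by
  simp only [dedupe_close_alt]

-- invariant: A's fold from accumulator 'out' equals out ++ B applied to the colors
-- still surviving against out
theorem foldA_eq_alt (t : Int) (colors : List (List Int)) (out : List (List Int)) :
    colors.foldl (fun out c => if pvKeep c t out then out ++ [c] else out) out
      = out ++ dedupe_close_alt (colors.filter (fun c => pvKeep c t out)) t := by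
  induction colors generalizing out with
  | nil => simp [alt_nil]
  | cons c cs ih =>
    rw [List.foldl_cons, List.filter_cons]
    by_cases hk : pvKeep c t out = true
    · have hfilter : cs.filter (fun x => pvKeep x t (out ++ [c]))
          = (cs.filter (fun x => pvKeep x t out)).filter
              (fun x => decide (t < pvDist x c)) := by
        rw [List.filter_filter]
        apply List.filter_congr
        intro x _
        rw [pvKeep_append, pvKeep_singleton, Bool.and_comm]
      rw [hk, if_pos rfl, ih (out ++ [c]), hfilter]
      simp [alt_cons]
    · rw [if_neg hk, ih out, if_neg hk]

-- ===== VERDICT (by name: the statement is the Claim_ definition above) =====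
theorem dedupe_close_spec : Claim_equal_dedupe_close := by
  intro colors t _ _
  unfold Spec_dedupe_close dedupe_close
  rw [foldA_eq_alt]
  simp [pvKeep, List.filter_eq_self.2]
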